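-- pv_equiv track=rewrite | github.com/AlfonsoJan/GenomeSigInfer | DeepBayesMutSig/DeepBayesMutSig/context.py | increase_mutations
-- ===== SOURCE A (Python) =====
-- import itertools
--
-- def increase_mutations(column: list[str], context: int) -> list[str]:
--     """
--     Increases mutations in a given column based on a specified context.
--
--     Args:
--         column (list): The list of mutations to be increased.
--         context (int): The context for increasing mutations.
--
--     Returns:
--         list: A list of increased mutations based on the specified context.
--     """
--     if context < 3:
--         raise ValueError("Context must be aleast 3")
--     nucleotides = ["A", "C", "G", "T"]
--     combinations = list(itertools.product(nucleotides, repeat=context - 3))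
--     new_mutations = [
--         f"{''.join(combo[:len(combo)//2])}{mut}{''.join(combo[len(combo)//2:])}"
--         for mut in column
--         for combo in combinations
--     ]
--     return new_mutations
-- ===== SOURCE B (Python) =====
-- import itertools
--
-- def increase_mutations(column: list[str], context: int) -> list[str]:
--     if context < 3:
--         raise ValueError("Context must be aleast 3")
--     nucleotides = ["A", "C", "G", "T"]
--     n = context - 3
--     half = n // 2
--     prefixes = ["".join(p) for p in itertools.product(nucleotides, repeat=half)]
--     suffixes = ["".join(s) for s in itertools.product(nucleotides, repeat=n - half)]
--     return [pre + mut + suf for mut in column for pre in prefixes for suf in suffixes]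
-- ===== Notes on version B (the rewrite author's own statement) =====
-- stated objective: faster
-- what changed: Instead of enumerating all 4^(context-3) full-length tuples and slicing+joining each tuple per output element, B precomputes the joined prefix strings (length n//2) and suffix strings (length n-n//2) once and emits pre+mut+suf via a triple nested comprehension, exploiting that product(repeat=n) split at n//2 equals the prefix-major cross product of the two smaller products.
import Mathlib
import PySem

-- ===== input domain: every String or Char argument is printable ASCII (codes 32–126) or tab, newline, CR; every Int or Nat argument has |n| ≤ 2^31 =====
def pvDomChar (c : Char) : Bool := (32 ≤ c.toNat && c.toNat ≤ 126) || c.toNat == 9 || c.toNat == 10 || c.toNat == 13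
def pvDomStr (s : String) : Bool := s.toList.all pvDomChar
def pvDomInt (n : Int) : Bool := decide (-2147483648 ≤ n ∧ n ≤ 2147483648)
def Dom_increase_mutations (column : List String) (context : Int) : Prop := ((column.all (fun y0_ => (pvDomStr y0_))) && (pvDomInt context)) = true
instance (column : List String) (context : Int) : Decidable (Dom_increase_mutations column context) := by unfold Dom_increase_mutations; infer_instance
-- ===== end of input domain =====

-- B precomputes the prefix and suffix product lists once instead of joining a slice of
-- every full-length tuple per output element (objective: faster, constant-factor).

-- itertools.product(["A","C","G","T"], repeat=k), leftmost position most significant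
def pvProd : Nat → List (List String)
  | 0 => [[]]
  | k + 1 => (["A", "C", "G", "T"]).flatMap (fun x => (pvProd k).map (fun c => x :: c))

-- ===== PORT A =====
def increase_mutations (column : List String) (context : Int) : List String :=
  -- 'if context < 3: raise' is excluded by Pre_
  let combinations := pvProd (context - 3).toNat
  column.flatMap (fun m_ =>
    combinations.map (fun combo =>
      String.join (combo.take (combo.length / 2)) ++ m_ ++
        String.join (combo.drop (combo.length / 2))))

-- ===== PORT B =====
def increase_mutations_alt (column : List String) (context : Int) : List String :=
  let n := (context - 3).toNat
  let half := n / 2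
  let prefixes := (pvProd half).map String.join
  let suffixes := (pvProd (n - half)).map String.join
  column.flatMap (fun m_ =>
    prefixes.flatMap (fun pre => suffixes.map (fun suf => pre ++ m_ ++ suf)))

-- ===== PRECONDITION & SPEC =====
-- A raises ValueError when context < 3; exactly those inputs are excluded.
def Pre_increase_mutations (column : List String) (context : Int) : Prop := 3 ≤ context
instance (column : List String) (context : Int) : Decidable (Pre_increase_mutations column context) := by unfold Pre_increase_mutations; infer_instance
def pvWitness_increase_mutations : List String × Int := (["C>A"], 4)

def Spec_increase_mutations (column : List String) (context : Int) (out : List String) : Prop := out = increase_mutations_alt column context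
instance (column : List String) (context : Int) (out : List String) : Decidable (Spec_increase_mutations column context out) := by unfold Spec_increase_mutations; infer_instance

-- ===== CLAIM (what is proved, stated in full; the proofs are below) =====
def Claim_equal_increase_mutations : Prop := ∀ (column : List String) (context : Int), Dom_increase_mutations column context → Pre_increase_mutations column context → Spec_increase_mutations column context (increase_mutations column context)

-- ===== LEMMAS AND PROOFS =====

theorem pvProd_length {k : Nat} {c : List String} (h : c ∈ pvProd k) : c.length = k := by
  induction k generalizing c with
  | zero => simp [pvProd] at h; simp [h]
  | succ k ih =>
    simp [pvProd] at h
    rcases h with ⟨c', hc', rfl⟩ | ⟨c', hc', rfl⟩ | ⟨c', hc', rfl⟩ | ⟨c', hc', rfl⟩ <;>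
      simp [ih hc']

theorem pvProd_add (a b : Nat) :
    pvProd (a + b) = (pvProd a).flatMap (fun p => (pvProd b).map (fun s => p ++ s)) := by
  induction a with
  | zero => simp [pvProd]
  | succ a ih =>
    have : a + 1 + b = (a + b) + 1 := by omega
    rw [this]
    simp only [pvProd, ih, List.map_flatMap, List.flatMap_map, List.map_map,
      List.flatMap_assoc, List.cons_append]
    rfl

theorem increase_mutations_spec : Claim_equal_increase_mutations := by
  intro column context _ _
  unfold Spec_increase_mutations increase_mutations increase_mutations_alt
  simp only
  set n := (context - 3).toNat with hn
  have hsplit : n / 2 + (n - n / 2) = n := by omega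
  congr 1
  funext m_
  conv_lhs => rw [← hsplit, pvProd_add]
  simp only [List.map_flatMap, List.flatMap_map, List.map_map]
  apply List.flatMap_congr
  intro p hp
  apply List.map_congr_left
  intro s hs
  have hpl : p.length = n / 2 := pvProd_length hp
  have hsl : s.length = n - n / 2 := pvProd_length hs
  have h1 : (p ++ s).length / 2 = p.length := by
    simp [List.length_append, hpl, hsl]; omega
  simp only [Function.comp_apply]
  rw [h1, List.take_left, List.drop_left]
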